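-- pv_equiv track=rewrite | github.com/ASSERT-KTH/Mokav | experiments/pynguin/c4b/return-lst/generated_tests/src_2600/1/src_2600.py | func
-- ===== SOURCE A (Python) =====
-- def func(*args):
-- 	ret_values = []
--
-- 	n = int(args[0])
-- 	x = int(args[1])
-- 	shell = [0, 0, 0]
-- 	shell[x] = 1
-- 	n = (n % 6)
-- 	while (n > 0):
-- 	    if ((n % 2) == 1):
-- 	        temp = shell[0]
-- 	        shell[0] = shell[1]
-- 	        shell[1] = temp
-- 	    else:
-- 	        temp = shell[1]
-- 	        shell[1] = shell[2]
-- 	        shell[2] = temp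
-- 	    n -= 1
-- 	i = 0
-- 	while (i < 3):
-- 	    if (shell[i] == 1):
-- 	        ret_values.append(i)
-- 	        break
-- 	    i += 1
--
-- 	return ret_values
-- ===== SOURCE B (Python) =====
-- PERM = [[0, 1, 2], [1, 0, 2], [1, 2, 0], [2, 1, 0], [2, 0, 1], [0, 2, 1]]
--
-- def func(*args):
-- 	n = int(args[0])
-- 	x = int(args[1])
-- 	shell = [0, 0, 0]
-- 	shell[x] = 1
-- 	p = shell.index(1)
-- 	return [PERM[n % 6][p]]
-- ===== Notes on version B (the rewrite author's own statement) =====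
-- stated objective: simpler
-- what changed: Replaced the parity-dependent swap loop and the linear scan for the ball by a precomputed 6x3 permutation table indexed by n % 6 and the ball's start position.
import Mathlib
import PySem

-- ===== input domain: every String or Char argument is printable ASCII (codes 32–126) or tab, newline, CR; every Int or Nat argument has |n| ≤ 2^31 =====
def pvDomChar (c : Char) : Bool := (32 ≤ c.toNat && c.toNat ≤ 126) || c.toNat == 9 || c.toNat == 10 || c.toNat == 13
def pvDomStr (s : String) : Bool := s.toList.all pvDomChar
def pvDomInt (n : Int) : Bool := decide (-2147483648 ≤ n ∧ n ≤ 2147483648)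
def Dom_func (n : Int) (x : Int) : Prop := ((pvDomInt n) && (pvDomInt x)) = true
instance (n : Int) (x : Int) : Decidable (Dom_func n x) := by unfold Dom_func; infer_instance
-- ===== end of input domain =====

-- B replaces A's swap loop and scan by a precomputed 6x3 permutation table lookup (simpler).

-- ===== PORT A =====
-- while (n > 0): swap shell[0]/shell[1] if n odd else shell[1]/shell[2]; n -= 1.
-- Fuel = n.toNat makes the recursion structural; since n decreases by 1 each pass it is exact.
def funcLoop : Nat → List Int → Int → List Int
  | 0, shell, _ => shell
  | fuel+1, shell, n =>
    if 0 < n then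
      let shell' :=
        if PySem.Int.mod n 2 = 1 then
          let temp := PySem.List.pyGetD shell 0 0
          let shell := PySem.List.pySetD shell 0 (PySem.List.pyGetD shell 1 0)
          PySem.List.pySetD shell 1 temp
        else
          let temp := PySem.List.pyGetD shell 1 0
          let shell := PySem.List.pySetD shell 1 (PySem.List.pyGetD shell 2 0)
          PySem.List.pySetD shell 2 temp
      funcLoop fuel shell' (n - 1)
    else shell

-- while (i < 3): if shell[i] == 1 then append i and break else i += 1.  Fuel 3 covers all iterations.
def funcScan : Nat → List Int → List Int → Int → List Int
  | 0, _, ret, _ => ret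
  | fuel+1, shell, ret, i =>
    if i < 3 then
      if PySem.List.pyGetD shell i 0 = 1 then ret ++ [i]
      else funcScan fuel shell ret (i + 1)
    else ret

def func (n : Int) (x : Int) : List Int :=
  let retValues : List Int := []
  let shell : List Int := [0, 0, 0]
  let shell := PySem.List.pySetD shell x 1
  let m := PySem.Int.mod n 6
  let shell := funcLoop m.toNat shell m
  funcScan 3 shell retValues 0

-- ===== PORT B =====
def pvPERM : List (List Int) := [[0, 1, 2], [1, 0, 2], [1, 2, 0], [2, 1, 0], [2, 0, 1], [0, 2, 1]]

def func_alt (n : Int) (x : Int) : List Int :=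
  let shell : List Int := [0, 0, 0]
  let shell := PySem.List.pySetD shell x 1
  let p : Nat := (PySem.List.index? shell 1).getD 0
  [PySem.List.pyGetD (PySem.List.pyGetD pvPERM (PySem.Int.mod n 6) []) (p : Int) 0]

-- ===== PRECONDITION & SPEC =====
-- Pre_ excludes exactly x outside -3..2, where Python's shell[x] = 1 raises IndexError in both A and B.
def Pre_func (n : Int) (x : Int) : Prop := PySem.Raise.InRange 3 x
instance (n : Int) (x : Int) : Decidable (Pre_func n x) := by unfold Pre_func; infer_instance

def pvWitness_func : Int × Int := (7, 1)

def Spec_func (n : Int) (x : Int) (out : List Int) : Prop := out = func_alt n x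
instance (n : Int) (x : Int) (out : List Int) : Decidable (Spec_func n x out) := by unfold Spec_func; infer_instance

-- ===== CLAIM (what is proved, stated in full; the proofs are below) =====
def Claim_equal_func : Prop := ∀ (n : Int) (x : Int), Dom_func n x → Pre_func n x → Spec_func n x (func n x)

-- ===== LEMMAS AND PROOFS =====
-- Both results depend on n only through m = n % 6 ∈ [0,6); with x ∈ [-3,3) this is 36 decidable cases.
theorem func_key : ∀ (m x : Int), 0 ≤ m → m < 6 → -3 ≤ x → x < 3 →
    funcScan 3 (funcLoop m.toNat (PySem.List.pySetD [0, 0, 0] x 1) m) [] 0 =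
    [PySem.List.pyGetD (PySem.List.pyGetD pvPERM m [])
      (((PySem.List.index? (PySem.List.pySetD ([0, 0, 0] : List Int) x 1) 1).getD 0 : Nat) : Int) 0] := by
  intro m x hm0 hm6 hx0 hx3
  interval_cases m <;> interval_cases x <;> decide

-- ===== VERDICT (by name: the statement is the Claim_ definition above) =====
theorem func_spec : Claim_equal_func := by
  intro n x _ hp
  have hb : (0:Int) < 6 := by norm_num
  have h1 := PySem.Int.mod_nonneg (a := n) (b := 6) hb
  have h2 := PySem.Int.mod_lt (a := n) (b := 6) hb
  have hx : -3 ≤ x ∧ x < 3 := by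
    simpa [Pre_func, PySem.Raise.InRange] using hp
  show func n x = func_alt n x
  simp only [func, func_alt]
  exact func_key (PySem.Int.mod n 6) x h1 h2 hx.1 hx.2
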